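-- pv_equiv track=rewrite | github.com/sheindel/airtable_python_tools_alpha | tests/test_performance_benchmarks.py | get_schema_stats
-- ===== SOURCE A (Python) =====
-- from typing import Dict, Any
--
-- def get_schema_stats(metadata: Dict[str, Any]) -> Dict[str, int]:
--     """Get statistics about the schema for context."""
--     stats = {
--         "tables": len(metadata.get("tables", [])),
--         "total_fields": 0,
--         "formula_fields": 0,
--         "lookup_fields": 0,
--         "rollup_fields": 0,
--     }
--
--     for table in metadata.get("tables", []):
--         fields = table.get("fields", [])
--         stats["total_fields"] += len(fields)
--
--         for field in fields:
--             field_type = field.get("type", "")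
--             if field_type == "formula":
--                 stats["formula_fields"] += 1
--             elif field_type == "multipleLookupValues":
--                 stats["lookup_fields"] += 1
--             elif field_type == "rollup":
--                 stats["rollup_fields"] += 1
--
--     return stats
-- ===== SOURCE B (Python) =====
-- def get_schema_stats(metadata):
--     """Get statistics about the schema for context."""
--
--     def rec(tables):
--         # map-reduce: per-table partial stats (total, formula, lookup, rollup),
--         # merged back-to-front by recursion
--         if not tables:
--             return (0, 0, 0, 0)
--         fields = tables[0].get("fields", [])
--         hist = {}
--         for f in fields:
--             t = f.get("type", "")
--             hist[t] = hist.get(t, 0) + 1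
--         rest = rec(tables[1:])
--         return (len(fields) + rest[0],
--                 hist.get("formula", 0) + rest[1],
--                 hist.get("multipleLookupValues", 0) + rest[2],
--                 hist.get("rollup", 0) + rest[3])
--
--     tables = metadata.get("tables", [])
--     tf, ff, lf, rf = rec(tables)
--     return {
--         "tables": len(tables),
--         "total_fields": tf,
--         "formula_fields": ff,
--         "lookup_fields": lf,
--         "rollup_fields": rf,
--     }
-- ===== Notes on version B (the rewrite author's own statement) =====
-- stated objective: alternative
-- what changed: Replaces A's single mutated stats dict with if/elif dispatch by a recursive map-reduce: each table yields a full histogram of its field types plus a partial stats tuple, and the tuples are merged component-wise by recursion over the table list.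
import Mathlib
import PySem

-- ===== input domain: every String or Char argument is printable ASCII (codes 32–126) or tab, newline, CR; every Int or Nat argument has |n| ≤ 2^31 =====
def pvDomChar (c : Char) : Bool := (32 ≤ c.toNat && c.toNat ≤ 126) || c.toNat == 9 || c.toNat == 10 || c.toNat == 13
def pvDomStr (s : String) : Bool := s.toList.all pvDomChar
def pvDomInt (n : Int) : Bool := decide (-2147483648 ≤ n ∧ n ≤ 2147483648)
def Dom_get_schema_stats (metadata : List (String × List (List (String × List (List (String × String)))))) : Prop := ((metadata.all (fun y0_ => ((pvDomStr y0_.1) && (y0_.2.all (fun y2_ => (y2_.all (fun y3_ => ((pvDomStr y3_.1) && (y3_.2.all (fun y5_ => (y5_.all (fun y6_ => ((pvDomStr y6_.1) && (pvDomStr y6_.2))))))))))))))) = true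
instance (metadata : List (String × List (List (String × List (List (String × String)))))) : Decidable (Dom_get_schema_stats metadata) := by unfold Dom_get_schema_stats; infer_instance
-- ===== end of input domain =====

-- B replaces A's single mutated stats dict (if/elif dispatch) by a recursive map-reduce: per-table histogram of field types, partial stats tuples merged by recursion (alternative decomposition, same cost).


-- ===== PORT A =====
def get_schema_stats (metadata : List (String × List (List (String × List (List (String × String)))))) : List (String × Int) :=
  let stats : PySem.Dict String Int := PySem.Dict.mk
    [("tables", PySem.List.len ((PySem.Dict.mk metadata).getD "tables" [])),
     ("total_fields", 0), ("formula_fields", 0), ("lookup_fields", 0), ("rollup_fields", 0)]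
  let stats := ((PySem.Dict.mk metadata).getD "tables" []).foldl (fun stats table =>
    let fields := (PySem.Dict.mk table).getD "fields" []
    let stats := stats.modify "total_fields" 0 (· + PySem.List.len fields)
    fields.foldl (fun stats field =>
      let field_type := (PySem.Dict.mk field).getD "type" ""
      if field_type == "formula" then stats.modify "formula_fields" 0 (· + 1)
      else if field_type == "multipleLookupValues" then stats.modify "lookup_fields" 0 (· + 1)
      else if field_type == "rollup" then stats.modify "rollup_fields" 0 (· + 1)
      else stats) stats) stats
  stats.items

-- ===== PORT B =====
-- B's inner helper 'rec': recursion over the table list, merging per-table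
-- (total, formula, lookup, rollup) tuples; each table's counts are read from a
-- histogram dict of its field types (hist[t] = hist.get(t, 0) + 1).
def pvAltRec (tables : List (List (String × List (List (String × String))))) : Int × Int × Int × Int :=
  match tables with
  | [] => (0, 0, 0, 0)
  | t :: rest =>
    let fields := (PySem.Dict.mk t).getD "fields" []
    let hist := fields.foldl (fun h f => h.modify ((PySem.Dict.mk f).getD "type" "") 0 (· + 1))
      (PySem.Dict.mk ([] : List (String × Int)))
    let r := pvAltRec rest
    (PySem.List.len fields + r.1,
     hist.getD "formula" 0 + r.2.1,
     hist.getD "multipleLookupValues" 0 + r.2.2.1,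
     hist.getD "rollup" 0 + r.2.2.2)

def get_schema_stats_alt (metadata : List (String × List (List (String × List (List (String × String)))))) : List (String × Int) :=
  let tables := (PySem.Dict.mk metadata).getD "tables" []
  let r := pvAltRec tables
  [("tables", PySem.List.len tables),
   ("total_fields", r.1),
   ("formula_fields", r.2.1),
   ("lookup_fields", r.2.2.1),
   ("rollup_fields", r.2.2.2)]

-- ===== PRECONDITION & SPEC =====
def Spec_get_schema_stats (metadata : List (String × List (List (String × List (List (String × String)))))) (out : List (String × Int)) : Prop := out = get_schema_stats_alt metadata
instance (metadata : List (String × List (List (String × List (List (String × String)))))) (out : List (String × Int)) : Decidable (Spec_get_schema_stats metadata out) := by unfold Spec_get_schema_stats; infer_instance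

-- ===== CLAIM (what is proved, stated in full; the proofs are below) =====
def Claim_equal_get_schema_stats : Prop := ∀ (metadata : List (String × List (List (String × List (List (String × String)))))), Dom_get_schema_stats metadata → Spec_get_schema_stats metadata (get_schema_stats metadata)

-- ===== LEMMAS AND PROOFS =====

-- one iteration of A's inner loop on the 5-key stats dict, as a dict-literal update
theorem inner_step (f : List (String × String)) (a b c d e : Int) :
    (let field_type := (PySem.Dict.mk f).getD "type" ""
     if field_type == "formula" then (PySem.Dict.mk [("tables", a), ("total_fields", b), ("formula_fields", c), ("lookup_fields", d), ("rollup_fields", e)]).modify "formula_fields" 0 (· + 1)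
     else if field_type == "multipleLookupValues" then (PySem.Dict.mk [("tables", a), ("total_fields", b), ("formula_fields", c), ("lookup_fields", d), ("rollup_fields", e)]).modify "lookup_fields" 0 (· + 1)
     else if field_type == "rollup" then (PySem.Dict.mk [("tables", a), ("total_fields", b), ("formula_fields", c), ("lookup_fields", d), ("rollup_fields", e)]).modify "rollup_fields" 0 (· + 1)
     else PySem.Dict.mk [("tables", a), ("total_fields", b), ("formula_fields", c), ("lookup_fields", d), ("rollup_fields", e)])
    = PySem.Dict.mk [("tables", a), ("total_fields", b),
        ("formula_fields", c + if (PySem.Dict.mk f).getD "type" "" == "formula" then 1 else 0),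
        ("lookup_fields", d + if (PySem.Dict.mk f).getD "type" "" == "multipleLookupValues" then 1 else 0),
        ("rollup_fields", e + if (PySem.Dict.mk f).getD "type" "" == "rollup" then 1 else 0)] := by
  dsimp only
  generalize (PySem.Dict.mk f).getD "type" "" = ft
  by_cases h1 : ft = "formula"
  · subst h1
    simp [PySem.Dict.modify, PySem.Dict.insert, PySem.Dict.getD, PySem.Dict.get?, PySem.Dict.contains]
  · by_cases h2 : ft = "multipleLookupValues"
    · subst h2
      simp [PySem.Dict.modify, PySem.Dict.insert, PySem.Dict.getD, PySem.Dict.get?, PySem.Dict.contains]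
    · by_cases h3 : ft = "rollup"
      · subst h3
        simp [PySem.Dict.modify, PySem.Dict.insert, PySem.Dict.getD, PySem.Dict.get?, PySem.Dict.contains]
      · simp [h1, h2, h3]

-- A's inner loop over one table's fields, from an arbitrary stats state
theorem inner_loop_eq (fields : List (List (String × String))) (a b c d e : Int) :
    fields.foldl (fun stats field =>
      let field_type := (PySem.Dict.mk field).getD "type" ""
      if field_type == "formula" then stats.modify "formula_fields" 0 (· + 1)
      else if field_type == "multipleLookupValues" then stats.modify "lookup_fields" 0 (· + 1)
      else if field_type == "rollup" then stats.modify "rollup_fields" 0 (· + 1)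
      else stats)
      (PySem.Dict.mk [("tables", a), ("total_fields", b), ("formula_fields", c), ("lookup_fields", d), ("rollup_fields", e)])
    = PySem.Dict.mk [("tables", a), ("total_fields", b),
        ("formula_fields", c + ((fields.map (fun f => (PySem.Dict.mk f).getD "type" "")).count "formula" : Int)),
        ("lookup_fields", d + ((fields.map (fun f => (PySem.Dict.mk f).getD "type" "")).count "multipleLookupValues" : Int)),
        ("rollup_fields", e + ((fields.map (fun f => (PySem.Dict.mk f).getD "type" "")).count "rollup" : Int))] := by
  induction fields generalizing c d e with
  | nil => simp
  | cons f fs ih =>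
    rw [List.foldl_cons, inner_step, ih]
    simp only [List.map_cons, List.count_cons, PySem.Dict.mk.injEq, List.cons.injEq, Prod.mk.injEq]
    norm_num
    split_ifs <;> simp_all <;> push_cast <;> ring

-- one iteration of A's outer loop
theorem outer_step (t : List (String × List (List (String × String)))) (a b c d e : Int) :
    (let fields := (PySem.Dict.mk t).getD "fields" []
     let stats := (PySem.Dict.mk [("tables", a), ("total_fields", b), ("formula_fields", c), ("lookup_fields", d), ("rollup_fields", e)]).modify "total_fields" 0 (· + PySem.List.len fields)
     fields.foldl (fun stats field =>
      let field_type := (PySem.Dict.mk field).getD "type" ""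
      if field_type == "formula" then stats.modify "formula_fields" 0 (· + 1)
      else if field_type == "multipleLookupValues" then stats.modify "lookup_fields" 0 (· + 1)
      else if field_type == "rollup" then stats.modify "rollup_fields" 0 (· + 1)
      else stats) stats)
    = PySem.Dict.mk [("tables", a),
        ("total_fields", b + PySem.List.len ((PySem.Dict.mk t).getD "fields" [])),
        ("formula_fields", c + ((((PySem.Dict.mk t).getD "fields" []).map (fun f => (PySem.Dict.mk f).getD "type" "")).count "formula" : Int)),
        ("lookup_fields", d + ((((PySem.Dict.mk t).getD "fields" []).map (fun f => (PySem.Dict.mk f).getD "type" "")).count "multipleLookupValues" : Int)),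
        ("rollup_fields", e + ((((PySem.Dict.mk t).getD "fields" []).map (fun f => (PySem.Dict.mk f).getD "type" "")).count "rollup" : Int))] := by
  dsimp only
  rw [show ((PySem.Dict.mk [("tables", a), ("total_fields", b), ("formula_fields", c), ("lookup_fields", d), ("rollup_fields", e)]).modify "total_fields" 0 (· + PySem.List.len ((PySem.Dict.mk t).getD "fields" [])))
      = PySem.Dict.mk [("tables", a), ("total_fields", b + PySem.List.len ((PySem.Dict.mk t).getD "fields" [])), ("formula_fields", c), ("lookup_fields", d), ("rollup_fields", e)]
    from by simp [PySem.Dict.modify, PySem.Dict.insert, PySem.Dict.getD, PySem.Dict.get?, PySem.Dict.contains]]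
  exact inner_loop_eq _ _ _ _ _ _

-- A's outer loop over all tables, from an arbitrary stats state
theorem outer_loop_eq (tables : List (List (String × List (List (String × String))))) (a b c d e : Int) :
    tables.foldl (fun stats table =>
      let fields := (PySem.Dict.mk table).getD "fields" []
      let stats := stats.modify "total_fields" 0 (· + PySem.List.len fields)
      fields.foldl (fun stats field =>
      let field_type := (PySem.Dict.mk field).getD "type" ""
      if field_type == "formula" then stats.modify "formula_fields" 0 (· + 1)
      else if field_type == "multipleLookupValues" then stats.modify "lookup_fields" 0 (· + 1)
      else if field_type == "rollup" then stats.modify "rollup_fields" 0 (· + 1)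
      else stats) stats)
      (PySem.Dict.mk [("tables", a), ("total_fields", b), ("formula_fields", c), ("lookup_fields", d), ("rollup_fields", e)])
    = PySem.Dict.mk [("tables", a),
        ("total_fields", b + PySem.List.len (tables.flatMap (fun t => ((PySem.Dict.mk t).getD "fields" []).map (fun f => (PySem.Dict.mk f).getD "type" "")))),
        ("formula_fields", c + ((tables.flatMap (fun t => ((PySem.Dict.mk t).getD "fields" []).map (fun f => (PySem.Dict.mk f).getD "type" ""))).count "formula" : Int)),
        ("lookup_fields", d + ((tables.flatMap (fun t => ((PySem.Dict.mk t).getD "fields" []).map (fun f => (PySem.Dict.mk f).getD "type" ""))).count "multipleLookupValues" : Int)),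
        ("rollup_fields", e + ((tables.flatMap (fun t => ((PySem.Dict.mk t).getD "fields" []).map (fun f => (PySem.Dict.mk f).getD "type" ""))).count "rollup" : Int))] := by
  induction tables generalizing b c d e with
  | nil => simp [PySem.List.len]
  | cons t ts ih =>
    rw [List.foldl_cons, outer_step, ih]
    simp only [List.flatMap_cons, List.count_append, PySem.Dict.mk.injEq, List.cons.injEq, Prod.mk.injEq, PySem.List.len_eq, List.length_append]
    norm_num
    refine ⟨?_, ?_, ?_, ?_⟩ <;> ring

-- B's recursion computes exactly the flattened totals/counts
theorem pvAltRec_eq (tables : List (List (String × List (List (String × String))))) :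
    pvAltRec tables =
      (PySem.List.len (tables.flatMap (fun t => ((PySem.Dict.mk t).getD "fields" []).map (fun f => (PySem.Dict.mk f).getD "type" ""))),
       ((tables.flatMap (fun t => ((PySem.Dict.mk t).getD "fields" []).map (fun f => (PySem.Dict.mk f).getD "type" ""))).count "formula" : Int),
       ((tables.flatMap (fun t => ((PySem.Dict.mk t).getD "fields" []).map (fun f => (PySem.Dict.mk f).getD "type" ""))).count "multipleLookupValues" : Int),
       ((tables.flatMap (fun t => ((PySem.Dict.mk t).getD "fields" []).map (fun f => (PySem.Dict.mk f).getD "type" ""))).count "rollup" : Int)) := by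
  induction tables with
  | nil => simp [pvAltRec, PySem.List.len]
  | cons t ts ih =>
    simp only [pvAltRec, ih]
    have hhist : ∀ k : String,
        (((PySem.Dict.mk t).getD "fields" []).foldl
            (fun h f => h.modify ((PySem.Dict.mk f).getD "type" "") 0 (· + 1))
            (PySem.Dict.mk ([] : List (String × Int)))).getD k 0
          = ((((PySem.Dict.mk t).getD "fields" []).map (fun f => (PySem.Dict.mk f).getD "type" "")).count k : Int) := by
      intro k
      rw [show (List.foldl (fun (h : PySem.Dict String Int) f => h.modify ((PySem.Dict.mk f).getD "type" "") 0 (· + 1)) (PySem.Dict.mk []) ((PySem.Dict.mk t).getD "fields" []))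
            = (((PySem.Dict.mk t).getD "fields" []).map (fun f => (PySem.Dict.mk f).getD "type" "")).foldl (fun h x => h.modify x 0 (· + 1)) (PySem.Dict.mk []) from by rw [List.foldl_map],
          PySem.Dict.getD_foldl_modify_add_one]
      simp [PySem.Dict.getD, PySem.Dict.get?]
    simp only [hhist, List.flatMap_cons, List.count_append, PySem.List.len_eq, List.length_append, List.length_map, Prod.mk.injEq]
    refine ⟨by push_cast; ring, by push_cast; ring, by push_cast; ring, by push_cast; ring⟩

-- ===== VERDICT (by name: the statement is the Claim_ definition above) =====
theorem get_schema_stats_spec : Claim_equal_get_schema_stats := by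
  intro metadata _
  show get_schema_stats metadata = get_schema_stats_alt metadata
  simp only [get_schema_stats, get_schema_stats_alt]
  rw [outer_loop_eq, pvAltRec_eq]
  simp
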